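-- pv_equiv track=rewrite | github.com/kahuku/competitive_programming | codesignal/lcp.py | solution
-- ===== SOURCE A (Python) =====
-- def solution(arr1, arr2):
--     root = {}
--     def addTrieNode(num):
--         num = str(num)
--         curr = root
--         for dig in num:
--             if dig not in curr:
--                 curr[dig] = {}
--             curr = curr[dig]
--
--     def countDepth(num):
--         depth = 0
--         num = str(num)
--         curr = root
--         for dig in num:
--             if dig in curr:
--                 curr = curr[dig]
--                 depth += 1
--             else:
--                 break
--         return depth
--
--     for num in arr1:
--         addTrieNode(num)
--
--     longest = 0
--     for num in arr2:
--         longest = max(countDepth(num), longest)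
--
--     return longest
-- ===== SOURCE B (Python) =====
-- def solution(arr1, arr2):
--     strs1 = [str(n) for n in arr1]
--     best = 0
--     for n2 in arr2:
--         s2 = str(n2)
--         for s1 in strs1:
--             k = 0
--             m = min(len(s1), len(s2))
--             while k < m and s1[k] == s2[k]:
--                 k += 1
--             best = max(best, k)
--     return best
-- ===== Notes on version B (the rewrite author's own statement) =====
-- stated objective: simpler
-- what changed: Replaces building a character trie from arr1 and querying it per element of arr2 by a direct pairwise scan: for each pair, compare str() characters position by position and keep the running maximum common-prefix length.
import Mathlib
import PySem

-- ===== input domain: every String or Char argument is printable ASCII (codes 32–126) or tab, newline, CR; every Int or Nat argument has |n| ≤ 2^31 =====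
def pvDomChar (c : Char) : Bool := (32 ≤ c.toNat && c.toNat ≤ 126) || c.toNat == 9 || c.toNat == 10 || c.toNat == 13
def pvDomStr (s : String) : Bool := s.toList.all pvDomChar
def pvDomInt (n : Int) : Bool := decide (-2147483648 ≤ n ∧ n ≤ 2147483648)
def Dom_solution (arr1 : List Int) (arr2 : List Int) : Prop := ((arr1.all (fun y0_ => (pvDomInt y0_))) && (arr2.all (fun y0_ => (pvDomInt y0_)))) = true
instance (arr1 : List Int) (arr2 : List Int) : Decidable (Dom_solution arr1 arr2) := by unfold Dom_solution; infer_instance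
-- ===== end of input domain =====

-- B replaces A's build-a-trie-then-query algorithm by a direct pairwise
-- common-prefix scan (objective: simpler).

-- str(num), shared transliteration helper for both ports
def pvToChars (n : Int) : List Char := (PySem.Int.toStr n).toList

-- ===== PORT A =====
-- A trie node is its list of children (Python's nested dict {}):
-- `cons c child rest` = the dict entry c ↦ child followed by the rest of the dict.
inductive Trie where
  | nil : Trie
  | cons : Char → Trie → Trie → Trie
deriving DecidableEq, Repr

-- `dig in curr` / `curr[dig]` on the child dict
def findC : Trie → Char → Option Trie
  | Trie.nil, _ => none
  | Trie.cons c ch rest, d => if c = d then some ch else findC rest d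

-- addTrieNode: walk the digits, creating a child ({} appended at the dict's end) when absent
def insertT : Trie → List Char → Trie
  | t, [] => t
  | Trie.nil, d :: ds => Trie.cons d (insertT Trie.nil ds) Trie.nil
  | Trie.cons c ch rest, d :: ds =>
      if c = d then Trie.cons c (insertT ch ds) rest
      else Trie.cons c ch (insertT rest (d :: ds))
termination_by t l => (l.length, sizeOf t)

-- countDepth: walk the digits while present, counting
def depthT : Trie → List Char → Int
  | _, [] => 0
  | t, d :: ds =>
      match findC t d with
      | some ch => 1 + depthT ch ds
      | none => 0

def solution (arr1 : List Int) (arr2 : List Int) : Int :=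
  let root := arr1.foldl (fun r num => insertT r (pvToChars num)) Trie.nil
  arr2.foldl (fun longest num => max (depthT root (pvToChars num)) longest) 0

-- ===== PORT B =====
-- the while loop: advance k while both strings continue and the chars agree
def cpl : List Char → List Char → Int
  | a :: as_, b :: bs => if a = b then 1 + cpl as_ bs else 0
  | _, _ => 0

def solution_alt (arr1 : List Int) (arr2 : List Int) : Int :=
  let strs1 := arr1.map pvToChars
  arr2.foldl (fun best n2 =>
    strs1.foldl (fun b s1 => max b (cpl (pvToChars n2) s1)) best) 0

-- ===== PRECONDITION & SPEC =====
def Spec_solution (arr1 : List Int) (arr2 : List Int) (out : Int) : Prop := out = solution_alt arr1 arr2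
instance (arr1 : List Int) (arr2 : List Int) (out : Int) : Decidable (Spec_solution arr1 arr2 out) := by unfold Spec_solution; infer_instance

-- ===== CLAIM (what is proved, stated in full; the proofs are below) =====
def Claim_equal_solution : Prop := ∀ (arr1 : List Int) (arr2 : List Int), Dom_solution arr1 arr2 → Spec_solution arr1 arr2 (solution arr1 arr2)

-- ===== LEMMAS AND PROOFS =====

theorem cpl_nonneg (s t : List Char) : 0 ≤ cpl s t := by
  induction s generalizing t with
  | nil => simp [cpl]
  | cons a as_ ih =>
    cases t with
    | nil => simp [cpl]
    | cons b bs =>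
      simp only [cpl]
      split_ifs
      · have := ih bs; omega
      · omega

theorem depthT_nonneg (t : Trie) (s : List Char) : 0 ≤ depthT t s := by
  induction s generalizing t with
  | nil => simp [depthT]
  | cons d ds ih =>
    simp only [depthT]
    cases h : findC t d with
    | none => simp
    | some ch => have := ih ch; simp; omega

theorem depthT_nil (s : List Char) : depthT Trie.nil s = 0 := by
  cases s <;> simp [depthT, findC]

theorem findC_insertT (T : Trie) (e : Char) (es : List Char) (d : Char) :
    findC (insertT T (e :: es)) d =
      if d = e then some (insertT ((findC T e).getD Trie.nil) es) else findC T d := by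
  induction T with
  | nil =>
    simp only [insertT, findC]
    by_cases h : d = e
    · simp [h]
    · simp [h, Ne.symm h]
  | cons c ch rest ihc ihr =>
    simp only [insertT]
    by_cases hce : c = e
    · subst hce
      rw [if_pos rfl]
      by_cases hdc : d = c
      · subst hdc; simp [findC]
      · simp [findC, hdc, Ne.symm hdc]
    · rw [if_neg hce]
      by_cases hcd : c = d
      · subst hcd
        simp [findC, hce]
      · rw [show findC (Trie.cons c ch (insertT rest (e :: es))) d =
              findC (insertT rest (e :: es)) d from by simp [findC, hcd]]
        rw [ihr]
        rw [show findC (Trie.cons c ch rest) e = findC rest e from by simp [findC, hce]]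
        rw [show findC (Trie.cons c ch rest) d = findC rest d from by simp [findC, hcd]]

theorem depthT_insertT (s : List Char) (T : Trie) (t : List Char) :
    depthT (insertT T t) s = max (depthT T s) (cpl s t) := by
  induction s generalizing T t with
  | nil => simp [depthT, cpl]
  | cons d ds ih =>
    cases t with
    | nil =>
      have h1 := depthT_nonneg T (d :: ds)
      simp only [insertT, cpl]
      omega
    | cons e es =>
      by_cases hde : d = e
      · subst hde
        have hf : findC (insertT T (d :: es)) d =
            some (insertT ((findC T d).getD Trie.nil) es) := by
          rw [findC_insertT]; simp
        cases h : findC T d with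
        | none =>
          have h1 := cpl_nonneg ds es
          simp only [depthT, hf, h, Option.getD, cpl, if_true, ih, depthT_nil]
          omega
        | some ch =>
          simp only [depthT, hf, h, Option.getD, cpl, if_true, ih]
          omega
      · have hf : findC (insertT T (e :: es)) d = findC T d := by
          rw [findC_insertT, if_neg hde]
        simp only [depthT, hf, cpl, if_neg hde]
        cases h : findC T d with
        | none => simp
        | some ch =>
          have h2 := depthT_nonneg ch ds
          simp; omega

-- folding insertions into the trie = folding max-of-common-prefix-length
theorem depthT_foldl (L : List Int) (T : Trie) (s : List Char) :
    depthT (L.foldl (fun r num => insertT r (pvToChars num)) T) s =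
      L.foldl (fun b n => max b (cpl s (pvToChars n))) (depthT T s) := by
  induction L generalizing T with
  | nil => rfl
  | cons n L ih =>
    simp only [List.foldl_cons, ih, depthT_insertT]

theorem foldl_max_shift {α : Type} (g : α → Int) (M : List α) (a b : Int) :
    M.foldl (fun x t => max x (g t)) (max a b) =
      max (M.foldl (fun x t => max x (g t)) a) b := by
  induction M generalizing a with
  | nil => rfl
  | cons t M ih =>
    simp only [List.foldl_cons]
    rw [show max (max a b) (g t) = max (max a (g t)) b by omega, ih]

theorem foldl_max_nonneg {α : Type} (g : α → Int) (M : List α) (a : Int)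
    (ha : 0 ≤ a) : 0 ≤ M.foldl (fun x t => max x (g t)) a := by
  induction M generalizing a with
  | nil => exact ha
  | cons t M ih => exact ih _ (le_trans ha (le_max_left a (g t)))

-- ===== VERDICT (by name: the statement is the Claim_ definition above) =====
theorem solution_spec : Claim_equal_solution := by
  intro arr1 arr2 _
  unfold Spec_solution solution solution_alt
  simp only [List.foldl_map]
  have key : ∀ (l2 : List Int) (acc : Int), 0 ≤ acc →
      l2.foldl (fun longest num =>
        max (depthT (arr1.foldl (fun r num => insertT r (pvToChars num)) Trie.nil)
          (pvToChars num)) longest) acc =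
      l2.foldl (fun best n2 =>
        arr1.foldl (fun b n => max b (cpl (pvToChars n2) (pvToChars n))) best) acc := by
    intro l2
    induction l2 with
    | nil => intro acc _; rfl
    | cons n l2 ih =>
      intro acc hacc
      simp only [List.foldl_cons]
      rw [depthT_foldl, depthT_nil]
      rw [show max (arr1.foldl (fun b m => max b (cpl (pvToChars n) (pvToChars m))) 0) acc =
            arr1.foldl (fun b m => max b (cpl (pvToChars n) (pvToChars m))) (max 0 acc) from
          (foldl_max_shift _ _ 0 acc).symm]
      rw [show max (0 : Int) acc = acc by omega]
      exact ih _ (foldl_max_nonneg _ _ _ hacc)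
  exact key arr2 0 le_rfl
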